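-- pv_equiv track=rewrite | github.com/nomadkaraoke/karaoke-prep | app.py | _estimate_remaining_time
-- ===== SOURCE A (Python) =====
-- from typing import Dict, Any, List, Optional
--
-- def _estimate_remaining_time(timeline: List[Dict], current_status: str) -> Optional[str]:
--     """Estimate remaining processing time based on historical data and current status."""
--     if current_status in ["complete", "error"]:
--         return None
--
--     # This is a simple estimation - in a real system you might use historical job data
--     # to make more accurate predictions
--     typical_durations = {
--         "queued": 30,
--         "processing": 900,  # 15 minutes
--         "awaiting_review": 0,  # User dependent
--         "reviewing": 0,  # User dependent
--         "rendering": 600,  # 10 minutes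
--     }
--
--     remaining_phases = []
--     found_current = False
--
--     for phase in ["queued", "processing", "awaiting_review", "rendering", "complete"]:
--         if phase == current_status:
--             found_current = True
--             continue
--         if found_current and phase != "complete":
--             remaining_phases.append(phase)
--
--     if not remaining_phases:
--         return None
--
--     total_estimated = sum(typical_durations.get(phase, 0) for phase in remaining_phases)
--
--     if total_estimated > 0:
--         return format_duration(total_estimated)
--
--     return None
--
-- def format_duration(seconds: int) -> str:
--     """Format duration in seconds to human-readable string."""
--     if seconds < 60:
--         return f"{seconds}s"
--     elif seconds < 3600:
--         minutes = seconds // 60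
--         remaining_seconds = seconds % 60
--         return f"{minutes}m {remaining_seconds}s"
--     else:
--         hours = seconds // 3600
--         remaining_minutes = (seconds % 3600) // 60
--         return f"{hours}h {remaining_minutes}m"
-- ===== SOURCE B (Python) =====
-- from typing import Dict, Any, List, Optional
--
-- def _estimate_remaining_time(timeline: List[Dict], current_status: str) -> Optional[str]:
--     if current_status in ["complete", "error"]:
--         return None
--
--     typical_durations = {
--         "queued": 30,
--         "processing": 900,
--         "awaiting_review": 0,
--         "reviewing": 0,
--         "rendering": 600,
--     }
--
--     # Suffix cumulative sums: remaining[phase] = sum of durations of the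
--     # strictly-following phases, excluding "complete".
--     remaining = {}
--     acc = 0
--     for phase in reversed(["queued", "processing", "awaiting_review", "rendering", "complete"]):
--         remaining[phase] = acc
--         if phase != "complete":
--             acc += typical_durations.get(phase, 0)
--
--     total = remaining.get(current_status, 0)
--     if total > 0:
--         return format_duration(total)
--     return None
--
-- def format_duration(seconds: int) -> str:
--     if seconds < 60:
--         return f"{seconds}s"
--     elif seconds < 3600:
--         minutes = seconds // 60
--         remaining_seconds = seconds % 60
--         return f"{minutes}m {remaining_seconds}s"
--     else:
--         hours = seconds // 3600
--         remaining_minutes = (seconds % 3600) // 60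
--         return f"{hours}h {remaining_minutes}m"
-- ===== Notes on version B (the rewrite author's own statement) =====
-- stated objective: simpler
-- what changed: Replaced the found_current flag loop plus per-call generator sum with a single reverse pass that precomputes suffix cumulative remaining times per phase, followed by one dict lookup.
import Mathlib
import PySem

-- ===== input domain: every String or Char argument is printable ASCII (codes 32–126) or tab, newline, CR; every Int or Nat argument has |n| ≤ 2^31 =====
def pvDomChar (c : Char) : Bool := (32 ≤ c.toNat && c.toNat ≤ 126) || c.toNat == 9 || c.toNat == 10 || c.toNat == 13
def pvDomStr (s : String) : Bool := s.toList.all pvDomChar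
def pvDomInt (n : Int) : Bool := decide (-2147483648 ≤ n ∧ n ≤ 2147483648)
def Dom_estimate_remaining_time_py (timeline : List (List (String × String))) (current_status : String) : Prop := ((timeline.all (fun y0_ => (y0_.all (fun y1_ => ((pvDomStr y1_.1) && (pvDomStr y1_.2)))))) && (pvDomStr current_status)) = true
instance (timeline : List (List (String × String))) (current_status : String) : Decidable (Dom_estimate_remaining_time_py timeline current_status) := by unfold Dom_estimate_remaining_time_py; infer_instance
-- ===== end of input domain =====

-- B replaces A's found_current flag loop + generator sum by one reverse suffix-sum pass and a single lookup (simpler; return value only — timeline is unused by both).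

-- shared module helper format_duration (both Pythons call it)
def pvFormatDuration (seconds : Int) : String :=
  if seconds < 60 then PySem.Int.toStr seconds ++ "s"
  else if seconds < 3600 then
    PySem.Int.toStr (PySem.Int.floordiv seconds 60) ++ "m " ++ PySem.Int.toStr (PySem.Int.mod seconds 60) ++ "s"
  else
    PySem.Int.toStr (PySem.Int.floordiv seconds 3600) ++ "h " ++ PySem.Int.toStr (PySem.Int.floordiv (PySem.Int.mod seconds 3600) 60) ++ "m"

def pvTypicalDurations : PySem.Dict String Int :=
  PySem.Dict.ofList [("queued", 30), ("processing", 900), ("awaiting_review", 0), ("reviewing", 0), ("rendering", 600)]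

def pvPhases : List String := ["queued", "processing", "awaiting_review", "rendering", "complete"]

-- ===== PORT A =====
def estimate_remaining_time_py (timeline : List (List (String × String))) (current_status : String) : Option String :=
  if current_status = "complete" ∨ current_status = "error" then none
  else
    let st := pvPhases.foldl (fun (s : List String × Bool) phase =>
      if phase = current_status then (s.1, true)
      else if s.2 ∧ phase ≠ "complete" then (s.1 ++ [phase], s.2)
      else s) ([], false)
    let remaining_phases := st.1
    if remaining_phases = [] then none
    else
      let total_estimated := remaining_phases.foldl
        (fun acc phase => acc + PySem.Dict.getD pvTypicalDurations phase 0) 0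
      if total_estimated > 0 then some (pvFormatDuration total_estimated) else none

-- ===== PORT B =====
def estimate_remaining_time_py_alt (timeline : List (List (String × String))) (current_status : String) : Option String :=
  if current_status = "complete" ∨ current_status = "error" then none
  else
    let st := pvPhases.reverse.foldl (fun (s : PySem.Dict String Int × Int) phase =>
      let m := PySem.Dict.insert s.1 phase s.2
      if phase ≠ "complete" then (m, s.2 + PySem.Dict.getD pvTypicalDurations phase 0)
      else (m, s.2)) (PySem.Dict.empty, 0)
    let total := PySem.Dict.getD st.1 current_status 0
    if total > 0 then some (pvFormatDuration total) else none

-- ===== PRECONDITION & SPEC =====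
def Spec_estimate_remaining_time_py (timeline : List (List (String × String))) (current_status : String) (out : Option String) : Prop := out = estimate_remaining_time_py_alt timeline current_status
instance (timeline : List (List (String × String))) (current_status : String) (out : Option String) : Decidable (Spec_estimate_remaining_time_py timeline current_status out) := by unfold Spec_estimate_remaining_time_py; infer_instance

-- ===== CLAIM (what is proved, stated in full; the proofs are below) =====
def Claim_equal_estimate_remaining_time_py : Prop := ∀ (timeline : List (List (String × String))) (current_status : String), Dom_estimate_remaining_time_py timeline current_status → Spec_estimate_remaining_time_py timeline current_status (estimate_remaining_time_py timeline current_status)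

-- ===== LEMMAS AND PROOFS =====

-- Neither port reads timeline; the result is a function of current_status alone,
-- so we case on whether current_status is one of the finitely many strings the
-- ports compare against, and evaluate both sides in each case.
theorem estimate_remaining_time_py_spec : Claim_equal_estimate_remaining_time_py := by
  intro timeline current_status _
  unfold Spec_estimate_remaining_time_py
  by_cases h1 : current_status = "complete"
  · subst h1; rfl
  by_cases h2 : current_status = "error"
  · subst h2; rfl
  by_cases h3 : current_status = "queued"
  · subst h3; rfl
  by_cases h4 : current_status = "processing"
  · subst h4; rfl
  by_cases h5 : current_status = "awaiting_review"
  · subst h5; rfl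
  by_cases h6 : current_status = "rendering"
  · subst h6; rfl
  · simp [estimate_remaining_time_py, estimate_remaining_time_py_alt, pvPhases,
      pvTypicalDurations, h1, h2, Ne.symm h1, Ne.symm h2, Ne.symm h3, Ne.symm h4,
      Ne.symm h5, Ne.symm h6,
      PySem.Dict.getD, PySem.Dict.get?, PySem.Dict.insert, PySem.Dict.empty, PySem.Dict.ofList,
      PySem.Dict.update, List.foldl]
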